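-- pv_equiv track=rewrite | github.com/jhelb1993/Channeler-Advance | editors/common/gba_graphics.py | max_sprite_height_tiles
-- ===== SOURCE A (Python) =====
-- def max_sprite_height_tiles(num_tiles: int) -> int:
--     """Largest ``H`` with ``H ≤ ceil(num_tiles / H)`` (row count does not exceed column count)."""
--     if num_tiles < 1:
--         return 1
--     best = 1
--     for h in range(1, num_tiles + 1):
--         w = (num_tiles + h - 1) // h
--         if h <= w:
--             best = h
--     return best
-- ===== SOURCE B (Python) =====
-- def max_sprite_height_tiles(num_tiles: int) -> int:
--     """Largest H with H <= ceil(num_tiles / H), found by binary search on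
--     the equivalent condition H*(H-1) < num_tiles (monotone in H)."""
--     if num_tiles < 1:
--         return 1
--     lo, hi = 1, num_tiles
--     while lo < hi:
--         mid = (lo + hi + 1) // 2
--         if mid * (mid - 1) < num_tiles:
--             lo = mid
--         else:
--             hi = mid - 1
--     return lo
-- ===== Notes on version B (the rewrite author's own statement) =====
-- stated objective: faster
-- what changed: Replaces A's linear scan over all candidate heights with a binary search for the largest H satisfying H*(H-1) < num_tiles, which is equivalent to H <= ceil(num_tiles/H).
import Mathlib
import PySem

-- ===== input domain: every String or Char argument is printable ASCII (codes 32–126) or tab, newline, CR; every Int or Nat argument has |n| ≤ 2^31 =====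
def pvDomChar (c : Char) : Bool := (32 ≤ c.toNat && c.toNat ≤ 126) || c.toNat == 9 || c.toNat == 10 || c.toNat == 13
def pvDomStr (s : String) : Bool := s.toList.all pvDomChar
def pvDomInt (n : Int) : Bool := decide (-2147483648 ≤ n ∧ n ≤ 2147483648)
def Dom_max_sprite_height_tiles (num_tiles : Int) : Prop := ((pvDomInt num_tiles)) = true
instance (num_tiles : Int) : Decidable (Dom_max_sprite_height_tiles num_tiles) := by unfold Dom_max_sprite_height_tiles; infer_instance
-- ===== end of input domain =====

-- B replaces A's linear scan with a binary search for the largest H with H*(H-1) < num_tiles (asymptotically faster).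

-- ===== PORT A =====
def max_sprite_height_tiles (num_tiles : Int) : Int :=
  if num_tiles < 1 then 1
  else
    (PySem.List.pyRange 1 (num_tiles + 1) 1).foldl
      (fun best h =>
        let w := PySem.Int.floordiv (num_tiles + h - 1) h
        if h ≤ w then h else best) 1

-- ===== PORT B =====
-- the while-loop of Source B as structural recursion on the interval width
def pvBsearch (num_tiles lo hi : Int) : Int :=
  if hlt : lo < hi then
    let mid := PySem.Int.floordiv (lo + hi + 1) 2
    if mid * (mid - 1) < num_tiles then pvBsearch num_tiles mid hi
    else pvBsearch num_tiles lo (mid - 1)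
  else lo
termination_by (hi - lo).toNat
decreasing_by
  · have h2 : (0:Int) < 2 := by norm_num
    rw [PySem.Int.floordiv_eq_ediv_of_pos h2]
    omega
  · have h2 : (0:Int) < 2 := by norm_num
    rw [PySem.Int.floordiv_eq_ediv_of_pos h2]
    omega

def max_sprite_height_tiles_alt (num_tiles : Int) : Int :=
  if num_tiles < 1 then 1
  else pvBsearch num_tiles 1 num_tiles

-- ===== PRECONDITION & SPEC =====
def Spec_max_sprite_height_tiles (num_tiles : Int) (out : Int) : Prop := out = max_sprite_height_tiles_alt num_tiles
instance (num_tiles : Int) (out : Int) : Decidable (Spec_max_sprite_height_tiles num_tiles out) := by unfold Spec_max_sprite_height_tiles; infer_instance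

-- ===== CLAIM (what is proved, stated in full; the proofs are below) =====
def Claim_equal_max_sprite_height_tiles : Prop := ∀ (num_tiles : Int), Dom_max_sprite_height_tiles num_tiles → Spec_max_sprite_height_tiles num_tiles (max_sprite_height_tiles num_tiles)

-- ===== LEMMAS AND PROOFS =====

-- the common characterisation: c is the largest h ≥ 1 with h*(h-1) < n
def pvGood (n c : Int) : Prop := 1 ≤ c ∧ c * (c - 1) < n ∧ ¬ ((c + 1) * c < n)

theorem pvGood_mono {n a b : Int} (ha : 1 ≤ a) (hab : a ≤ b) (hb : b * (b - 1) < n) :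
    a * (a - 1) < n := by nlinarith

theorem pvGood_unique {n c d : Int} (hc : pvGood n c) (hd : pvGood n d) : c = d := by
  obtain ⟨hc1, hc2, hc3⟩ := hc
  obtain ⟨hd1, hd2, hd3⟩ := hd
  by_contra hne
  rcases lt_or_gt_of_ne hne with h | h
  · exact hc3 (by have := pvGood_mono (by omega : (1:Int) ≤ c + 1) (by omega : c + 1 ≤ d) hd2
                  nlinarith)
  · exact hd3 (by have := pvGood_mono (by omega : (1:Int) ≤ d + 1) (by omega : d + 1 ≤ c) hc2
                  nlinarith)

-- A's loop condition h ≤ (n + h - 1) // h equals h*(h-1) < n, for h ≥ 1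
theorem pvCond_iff (n h : Int) (hh : 1 ≤ h) :
    (h ≤ PySem.Int.floordiv (n + h - 1) h) ↔ h * (h - 1) < n := by
  rw [PySem.Int.le_floordiv_iff_mul_le (by omega : 0 < h)]
  constructor <;> intro H <;> nlinarith

-- fold over a range where every element satisfies the condition: result is the last element
theorem pvFold_all_true (c : Int → Prop) [DecidablePred c] (f : Int → Int)
    (hf : ∀ h, c h ↔ h ≤ f h) :
    ∀ (k : Nat) (a b init : Int), b - a = (k : Int) → a < b →
      (∀ h, a ≤ h → h < b → c h) →
      (PySem.List.pyRange a b 1).foldl (fun best h => if h ≤ f h then h else best) init = b - 1 := by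
  intro k
  induction k with
  | zero => intro a b init hk hab _; omega
  | succ m ih =>
    intro a b init hk hab hall
    rw [PySem.List.pyRange_one_cons hab, List.foldl_cons]
    by_cases hm : a + 1 < b
    · have := ih (a + 1) b (if a ≤ f a then a else init) (by omega) hm
        (fun h h1 h2 => hall h (by omega) h2)
      exact this
    · have hb : b = a + 1 := by omega
      subst hb
      rw [PySem.List.pyRange_one_eq_nil (by omega)]
      simp only [List.foldl_nil]
      have : c a := hall a le_rfl (by omega)
      rw [if_pos ((hf a).mp this)]
      omega

-- fold over a list where no element satisfies the condition: result is the initial value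
theorem pvFold_all_false (c : Int → Prop) [DecidablePred c] (f : Int → Int)
    (hf : ∀ h, c h ↔ h ≤ f h) :
    ∀ (l : List Int) (init : Int), (∀ h ∈ l, ¬ c h) →
      l.foldl (fun best h => if h ≤ f h then h else best) init = init := by
  intro l
  induction l with
  | nil => intro init _; rfl
  | cons x t ih =>
    intro init hall
    rw [List.foldl_cons, if_neg (by
      intro hx
      exact hall x (List.mem_cons_self) ((hf x).mpr hx))]
    exact ih init (fun h hm => hall h (List.mem_cons_of_mem _ hm))

-- A's result satisfies pvGood (for n ≥ 1)
def pvH (n : Int) : Nat := Nat.findGreatest (fun j => (j : Int) * ((j : Int) - 1) < n) n.toNat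

theorem pvA_good (n : Int) (hn : 1 ≤ n) : pvGood n (max_sprite_height_tiles n) := by
  have hH1 : 1 ≤ pvH n :=
    Nat.le_findGreatest (P := fun j => (j : Int) * ((j : Int) - 1) < n) (n := n.toNat)
      (by omega) (by norm_num; omega)
  have hHle : pvH n ≤ n.toNat := Nat.findGreatest_le _
  have hHp : ((pvH n : Int)) * ((pvH n : Int) - 1) < n :=
    Nat.findGreatest_spec (P := fun j => (j : Int) * ((j : Int) - 1) < n) (n := n.toNat)
      (m := 1) (by omega) (by norm_num; omega)
  have hHnot : ¬ (((pvH n : Int)) + 1) * ((pvH n : Int)) < n := by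
    by_cases hc : pvH n + 1 ≤ n.toNat
    · have hng := Nat.findGreatest_is_greatest (k := pvH n + 1)
        (P := fun j => (j : Int) * ((j : Int) - 1) < n)
        (Nat.lt_succ_of_le (Nat.le_of_eq rfl)) hc
      push_cast at hng
      intro hcon; apply hng; nlinarith
    · have hHn : ((pvH n : Int)) = n := by rw [not_le] at hc; omega
      rw [hHn]; nlinarith
  have hgood : pvGood n ((pvH n : Int)) := ⟨by exact_mod_cast hH1, hHp, hHnot⟩
  have hAn : max_sprite_height_tiles n = ((pvH n : Int)) := by
    unfold max_sprite_height_tiles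
    rw [if_neg (by omega)]
    rw [PySem.List.pyRange_one_append 1 (((pvH n : Int)) + 1) (n + 1) (by omega) (by omega),
      List.foldl_append]
    rw [pvFold_all_true (fun h => h ≤ PySem.Int.floordiv (n + h - 1) h)
        (fun h => PySem.Int.floordiv (n + h - 1) h) (fun _ => Iff.rfl)
        (pvH n) 1 (((pvH n : Int)) + 1) 1 (by omega) (by omega)
        (fun h h1 h2 => (pvCond_iff n h (by omega)).mpr
          (pvGood_mono (by omega) (by omega) hgood.2.1))]
    rw [pvFold_all_false (fun h => h ≤ PySem.Int.floordiv (n + h - 1) h)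
        (fun h => PySem.Int.floordiv (n + h - 1) h) (fun _ => Iff.rfl) _ _ (by
          intro h hm
          rw [PySem.List.mem_pyRange_one] at hm
          intro hle
          have hlt := (pvCond_iff n h (by omega)).mp hle
          have := pvGood_mono (by omega : (1:Int) ≤ (pvH n : Int) + 1)
            (by omega : ((pvH n : Int)) + 1 ≤ h) hlt
          apply hHnot; nlinarith)]
    omega
  rw [hAn]; exact hgood

-- B's binary search satisfies pvGood given the loop invariant
theorem pvB_inv (n : Int) : ∀ (k : Nat) (lo hi : Int), hi - lo = (k : Int) →
    1 ≤ lo → lo ≤ hi → lo * (lo - 1) < n → ¬ ((hi + 1) * hi < n) →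
    pvGood n (pvBsearch n lo hi) := by
  intro k
  induction k using Nat.strong_induction_on with
  | _ k ih =>
    intro lo hi hk h1 hle hlo hhi
    rw [pvBsearch]
    by_cases hlt : lo < hi
    · rw [dif_pos hlt]
      have h2 : (0:Int) < 2 := by norm_num
      have hmid : PySem.Int.floordiv (lo + hi + 1) 2 = (lo + hi + 1) / 2 :=
        PySem.Int.floordiv_eq_ediv_of_pos h2
      simp only [hmid]
      set mid := (lo + hi + 1) / 2 with hmdef
      have hmb : lo < mid ∧ mid ≤ hi := by constructor <;> omega
      by_cases hc : mid * (mid - 1) < n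
      · rw [if_pos hc]
        exact ih (hi - mid).toNat (by omega) mid hi (by omega) (by omega) (by omega) hc hhi
      · rw [if_neg hc]
        exact ih (mid - 1 - lo).toNat (by omega) lo (mid - 1) (by omega) h1 (by omega) hlo
          (by simpa using hc)
    · rw [dif_neg hlt]
      have : lo = hi := by omega
      exact ⟨h1, hlo, by rw [this] at *; exact hhi⟩

theorem pvB_good (n : Int) (hn : 1 ≤ n) : pvGood n (max_sprite_height_tiles_alt n) := by
  unfold max_sprite_height_tiles_alt
  rw [if_neg (by omega)]
  exact pvB_inv n (n - 1).toNat 1 n (by omega) le_rfl hn (by nlinarith) (by nlinarith)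

-- ===== VERDICT (by name: the statement is the Claim_ definition above) =====
theorem max_sprite_height_tiles_spec : Claim_equal_max_sprite_height_tiles := by
  intro n _
  unfold Spec_max_sprite_height_tiles
  by_cases hn : n < 1
  · unfold max_sprite_height_tiles max_sprite_height_tiles_alt
    rw [if_pos hn, if_pos hn]
  · exact pvGood_unique (pvA_good n (by omega)) (pvB_good n (by omega))
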